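-- pv_equiv track=rewrite | github.com/rager306/law-nexus | scripts/prove-m003-s02-minimax-pyo3-endpoint.py | payload_status
-- ===== SOURCE A (Python) =====
-- from typing import Any, Literal, cast
--
-- Status = Literal[
--     "not-run-local-only",
--     "blocked-environment",
--     "blocked-credential",
--     "failed-runtime",
--     "confirmed-runtime",
-- ]
--
-- def payload_status(phases: dict[str, Any]) -> tuple[Status, str, str]:
--     order = ("endpoint_contract", "build", "import", "resolver", "provider")
--     last_phase = "endpoint-contract"
--     root_cause = "none"
--     for phase_name in order:
--         phase = phases.get(phase_name, {})
--         status = phase.get("status")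
--         if status in ("blocked-environment", "blocked-credential", "failed-runtime"):
--             return cast(Status, status), str(phase.get("root_cause", "unknown")), str(phase.get("phase", phase_name.replace("_", "-")))
--         if status and status != "not-run":
--             last_phase = str(phase.get("phase", phase_name.replace("_", "-")))
--             root_cause = str(phase.get("root_cause", root_cause))
--     provider = phases.get("provider", {})
--     if provider.get("status") == "confirmed-runtime":
--         return "confirmed-runtime", "none", "provider"
--     return "not-run-local-only", root_cause, last_phase
-- ===== SOURCE B (Python) =====
-- def payload_status(phases):
--     order = ("endpoint_contract", "build", "import", "resolver", "provider")
--     blocking = ("blocked-environment", "blocked-credential", "failed-runtime")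
--     # pass 1: first blocked/failed phase decides the result immediately
--     for name in order:
--         phase = phases.get(name, {})
--         status = phase.get("status")
--         if status in blocking:
--             return status, str(phase.get("root_cause", "unknown")), str(phase.get("phase", name.replace("_", "-")))
--     # pass 2: collect the phases that actually ran, then read answers back-to-front
--     active = [(name, phases.get(name, {})) for name in order
--               if phases.get(name, {}).get("status") and phases.get(name, {}).get("status") != "not-run"]
--     last_phase = next((str(p.get("phase", n.replace("_", "-"))) for n, p in reversed(active)),
--                       "endpoint-contract")
--     root_cause = next((str(p["root_cause"]) for _, p in reversed(active) if "root_cause" in p),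
--                       "none")
--     if phases.get("provider", {}).get("status") == "confirmed-runtime":
--         return "confirmed-runtime", "none", "provider"
--     return "not-run-local-only", root_cause, last_phase
-- ===== Notes on version B (the rewrite author's own statement) =====
-- stated objective: alternative
-- what changed: Replaced A's single stateful loop (early return plus two chained accumulators) by two stateless passes: a first scan that returns at the first blocked/failed phase, then a filtered list of active phases read back-to-front with next() to recover last_phase and the chained root_cause default.
import Mathlib
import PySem

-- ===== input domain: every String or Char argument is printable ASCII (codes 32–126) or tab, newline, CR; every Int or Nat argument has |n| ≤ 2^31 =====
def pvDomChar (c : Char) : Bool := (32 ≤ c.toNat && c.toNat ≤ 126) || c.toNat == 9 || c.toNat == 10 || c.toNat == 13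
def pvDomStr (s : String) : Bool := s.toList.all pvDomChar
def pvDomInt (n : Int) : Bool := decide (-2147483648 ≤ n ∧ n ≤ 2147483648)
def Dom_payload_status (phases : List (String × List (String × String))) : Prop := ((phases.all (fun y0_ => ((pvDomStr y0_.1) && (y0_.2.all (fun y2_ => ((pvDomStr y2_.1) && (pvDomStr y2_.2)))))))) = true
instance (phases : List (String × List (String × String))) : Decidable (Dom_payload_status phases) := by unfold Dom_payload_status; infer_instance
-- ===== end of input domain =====

-- B restates A's single stateful early-return loop as two stateless passes (first blocking phase, then
-- active phases read back-to-front); same cost, different decomposition. Equivalence is proved on all inputs.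

-- dict.get k (first-match lookup on the association list, per the type convention)
def pvGet {α : Type} (l : List (String × α)) (k : String) : Option α :=
  (l.find? (fun kv => kv.1 == k)).map (·.2)

def pvOrder : List String := ["endpoint_contract", "build", "import", "resolver", "provider"]

-- ===== PORT A =====
def pvALoop (phases : List (String × List (String × String))) :
    List String → String → String → String × String × String
  | [], last_phase, root_cause =>
    let provider := (pvGet phases "provider").getD []
    if pvGet provider "status" == some "confirmed-runtime" then
      ("confirmed-runtime", "none", "provider")
    else
      ("not-run-local-only", root_cause, last_phase)
  | phase_name :: rest, last_phase, root_cause =>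
    let phase := (pvGet phases phase_name).getD []
    match pvGet phase "status" with
    | some status =>
      if status == "blocked-environment" || status == "blocked-credential" || status == "failed-runtime" then
        (status, (pvGet phase "root_cause").getD "unknown",
         (pvGet phase "phase").getD (PySem.Str.replace phase_name "_" "-"))
      else if status != "" && status != "not-run" then
        pvALoop phases rest ((pvGet phase "phase").getD (PySem.Str.replace phase_name "_" "-"))
          ((pvGet phase "root_cause").getD root_cause)
      else
        pvALoop phases rest last_phase root_cause
    | none => pvALoop phases rest last_phase root_cause

def payload_status (phases : List (String × List (String × String))) : String × String × String :=
  pvALoop phases pvOrder "endpoint-contract" "none"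

-- ===== PORT B =====
def pvBlockScan (phases : List (String × List (String × String))) :
    List String → Option (String × String × String)
  | [] => none
  | name :: rest =>
    let phase := (pvGet phases name).getD []
    match pvGet phase "status" with
    | some s =>
      if s == "blocked-environment" || s == "blocked-credential" || s == "failed-runtime" then
        some (s, (pvGet phase "root_cause").getD "unknown",
              (pvGet phase "phase").getD (PySem.Str.replace name "_" "-"))
      else pvBlockScan phases rest
    | none => pvBlockScan phases rest

def pvActive (phases : List (String × List (String × String))) (os : List String) :
    List (String × List (String × String)) :=
  os.filterMap (fun name =>
    let phase := (pvGet phases name).getD []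
    match pvGet phase "status" with
    | some s => if s != "" && s != "not-run" then some (name, phase) else none
    | none => none)

def pvLastPhase (act : List (String × List (String × String))) (dflt : String) : String :=
  match act.reverse.head? with
  | some np => (pvGet np.2 "phase").getD (PySem.Str.replace np.1 "_" "-")
  | none => dflt

def pvRootCause (act : List (String × List (String × String))) (dflt : String) : String :=
  match (act.reverse.filterMap (fun np => pvGet np.2 "root_cause")).head? with
  | some r => r
  | none => dflt

def payload_status_alt (phases : List (String × List (String × String))) : String × String × String :=
  match pvBlockScan phases pvOrder with
  | some r => r
  | none =>
    let act := pvActive phases pvOrder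
    let provider := (pvGet phases "provider").getD []
    if pvGet provider "status" == some "confirmed-runtime" then
      ("confirmed-runtime", "none", "provider")
    else
      ("not-run-local-only", pvRootCause act "none", pvLastPhase act "endpoint-contract")

-- ===== PRECONDITION & SPEC =====
def Spec_payload_status (phases : List (String × List (String × String))) (out : String × String × String) : Prop := out = payload_status_alt phases
instance (phases : List (String × List (String × String))) (out : String × String × String) : Decidable (Spec_payload_status phases out) := by unfold Spec_payload_status; infer_instance

-- ===== CLAIM (what is proved, stated in full; the proofs are below) =====
def Claim_equal_payload_status : Prop := ∀ (phases : List (String × List (String × String))), Dom_payload_status phases → Spec_payload_status phases (payload_status phases)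

-- ===== LEMMAS AND PROOFS =====

theorem pvLastPhase_cons (x : String × List (String × String)) (act : List (String × List (String × String))) (dflt : String) :
    pvLastPhase (x :: act) dflt = pvLastPhase act ((pvGet x.2 "phase").getD (PySem.Str.replace x.1 "_" "-")) := by
  cases h : act.reverse <;> simp [pvLastPhase, h]

theorem pvRootCause_cons (x : String × List (String × String)) (act : List (String × List (String × String))) (dflt : String) :
    pvRootCause (x :: act) dflt = pvRootCause act ((pvGet x.2 "root_cause").getD dflt) := by
  cases h : act.reverse.filterMap (fun np => pvGet np.2 "root_cause") <;>
    cases h2 : pvGet x.2 "root_cause" <;>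
      simp [pvRootCause, List.filterMap_append, h, h2]

theorem pvLoop_eq (phases : List (String × List (String × String))) (os : List String)
    (lp rc : String) :
    pvALoop phases os lp rc =
      match pvBlockScan phases os with
      | some r => r
      | none =>
        let act := pvActive phases os
        let provider := (pvGet phases "provider").getD []
        if pvGet provider "status" == some "confirmed-runtime" then
          ("confirmed-runtime", "none", "provider")
        else
          ("not-run-local-only", pvRootCause act rc, pvLastPhase act lp) := by
  induction os generalizing lp rc with
  | nil => simp [pvALoop, pvBlockScan, pvActive, pvLastPhase, pvRootCause]
  | cons name rest ih =>
    cases h : pvGet ((pvGet phases name).getD []) "status" with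
    | none =>
      simp only [pvALoop, pvBlockScan, pvActive, List.filterMap_cons, h, ih]
    | some s =>
      by_cases hb : (s == "blocked-environment" || s == "blocked-credential" || s == "failed-runtime") = true
      · simp only [pvALoop, pvBlockScan, h, hb, if_pos]
      · by_cases ha : (s != "" && s != "not-run") = true
        · simp only [pvALoop, pvBlockScan, pvActive, List.filterMap_cons, h, hb, ha, if_neg,
            if_pos, Bool.false_eq_true, not_false_iff, ih, pvLastPhase_cons, pvRootCause_cons]
        · simp only [pvALoop, pvBlockScan, pvActive, List.filterMap_cons, h, hb, ha, if_neg,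
            Bool.false_eq_true, not_false_iff, ih]

-- ===== VERDICT (by name: the statement is the Claim_ definition above) =====
theorem payload_status_spec : Claim_equal_payload_status := by
  intro phases _
  show payload_status phases = payload_status_alt phases
  simp only [payload_status, payload_status_alt, pvLoop_eq]
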